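-- pv_equiv track=rewrite | github.com/foowaa/short-chn-yn | y_n.py | boolean_replace
-- ===== SOURCE A (Python) =====
-- from functools import reduce
--
-- def boolean_replace(s, yes, no, others, filtered):
--     sen1 = set(s)-others
--     sen2 = sen1-yes-no
--     # 如果有过滤词，直接返回4
--     for e in filtered:
--         if s.find(e)>-1:
--             return 4
--     # 无意义句子
--     if not sen1:
--         return 0
--     if sen2:
--         return 1
--     t_count = 0
--     f_count = 0
--     for e in yes:
--         t_count += s.count(e)
--     t = [True for _ in range(t_count)]
--     for e in no:
--         f_count += s.count(e)
--     f = [False for _ in range(f_count)]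
--
--     tf = t+f
--     result = reduce(lambda x,y: not (bool(x)^bool(y)), tf)
--     if result:
--         return 2
--     if not result:
--          return 3
-- ===== SOURCE B (Python) =====
-- def boolean_replace(s, yes, no, others, filtered):
--     if any(e in s for e in filtered):
--         return 4
--     chars = set(s) - others
--     if not chars:
--         return 0
--     if chars - yes - no:
--         return 1
--     f_count = sum(s.count(e) for e in no)
--     return 2 if f_count % 2 == 0 else 3
-- ===== Notes on version B (the rewrite author's own statement) =====
-- stated objective: simpler
-- what changed: B drops the yes-count, the two boolean-list constructions and the XNOR reduce, returning 2/3 directly from the parity of the total no-match count (the fold's value equals 'f_count is even'); the filtered scan and set guards remain.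
import Mathlib
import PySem

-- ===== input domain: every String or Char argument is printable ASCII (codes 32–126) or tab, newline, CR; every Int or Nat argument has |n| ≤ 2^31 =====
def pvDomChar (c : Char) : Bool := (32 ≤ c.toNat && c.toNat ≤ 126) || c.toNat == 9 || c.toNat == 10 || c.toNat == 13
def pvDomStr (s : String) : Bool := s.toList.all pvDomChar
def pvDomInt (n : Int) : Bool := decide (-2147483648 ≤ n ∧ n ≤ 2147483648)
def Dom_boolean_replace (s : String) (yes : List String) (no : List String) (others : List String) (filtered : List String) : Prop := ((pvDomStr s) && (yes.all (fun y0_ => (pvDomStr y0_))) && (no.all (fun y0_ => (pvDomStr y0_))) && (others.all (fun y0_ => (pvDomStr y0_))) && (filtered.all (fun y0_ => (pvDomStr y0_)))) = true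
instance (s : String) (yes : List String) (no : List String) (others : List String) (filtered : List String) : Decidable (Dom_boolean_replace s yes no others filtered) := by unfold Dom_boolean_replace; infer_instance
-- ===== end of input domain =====

-- B replaces A's boolean-list construction and XNOR reduce by the parity of the no-match count: simpler, same values.


-- ===== PORT A =====
-- 'for e in filtered: if s.find(e) > -1: return 4' (early-return loop)
def brFilt (s : String) : List String → Bool
  | [] => false
  | e :: rest => if PySem.Str.find s e > -1 then true else brFilt s rest

-- reduce(lambda x,y: not (bool(x)^bool(y)), tf) after the first element has been taken as the accumulator
def brReduce (x : Bool) : List Bool → Bool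
  | [] => x
  | y :: rest => brReduce (!(x.xor y)) rest

def boolean_replace (s : String) (yes : List String) (no : List String) (others : List String) (filtered : List String) : Int :=
  let sen1 := PySem.Set.diff (PySem.Set.ofList (s.toList.map (fun c => String.mk [c]))) others
  let sen2 := PySem.Set.diff (PySem.Set.diff sen1 yes) no
  if brFilt s filtered then 4
  else if sen1 = [] then 0
  else if sen2 ≠ [] then 1
  else
    let t_count : Int := yes.foldl (fun acc e => acc + (PySem.Str.count s e : Int)) 0
    let t := List.replicate t_count.toNat true
    let f_count : Int := no.foldl (fun acc e => acc + (PySem.Str.count s e : Int)) 0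
    let f := List.replicate f_count.toNat false
    match t ++ f with
    | [] => 0  -- Python's reduce would raise TypeError here; this case is proved unreachable (brTF_ne_nil below)
    | x :: rest => if brReduce x rest then 2 else 3

-- ===== PORT B =====
def boolean_replace_alt (s : String) (yes : List String) (no : List String) (others : List String) (filtered : List String) : Int :=
  if filtered.any (fun e => PySem.Str.isIn e s) then 4
  else
    let chars := PySem.Set.diff (PySem.Set.ofList (s.toList.map (fun c => String.mk [c]))) others
    if chars = [] then 0
    else if PySem.Set.diff (PySem.Set.diff chars yes) no ≠ [] then 1
    else
      let f_count : Int := (no.map (fun e => (PySem.Str.count s e : Int))).sum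
      if PySem.Int.mod f_count 2 = 0 then 2 else 3

-- ===== PRECONDITION & SPEC =====
def Spec_boolean_replace (s : String) (yes : List String) (no : List String) (others : List String) (filtered : List String) (out : Int) : Prop := out = boolean_replace_alt s yes no others filtered
instance (s : String) (yes : List String) (no : List String) (others : List String) (filtered : List String) (out : Int) : Decidable (Spec_boolean_replace s yes no others filtered out) := by unfold Spec_boolean_replace; infer_instance

-- ===== CLAIM (what is proved, stated in full; the proofs are below) =====
def Claim_equal_boolean_replace : Prop := ∀ (s : String) (yes : List String) (no : List String) (others : List String) (filtered : List String), Dom_boolean_replace s yes no others filtered → Spec_boolean_replace s yes no others filtered (boolean_replace s yes no others filtered)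

-- ===== LEMMAS AND PROOFS =====

-- the early-return filtered loop is an 'any' over substring tests
theorem brFilt_eq_any (s : String) (filtered : List String) :
    brFilt s filtered = filtered.any (fun e => PySem.Str.isIn e s) := by
  induction filtered with
  | nil => rfl
  | cons e rest ih =>
    simp only [brFilt, List.any_cons, ih]
    by_cases h : PySem.Str.isIn e s = true
    · have : (0:Int) ≤ PySem.Str.find s e := (PySem.Str.find_nonneg_iff s e).mpr ((PySem.Str.isIn_iff_infix e s).mp h)
      rw [if_pos (by omega), h]; rfl
    · have hb : PySem.Str.isIn e s = false := by simpa using h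
      have : ¬ e.toList <:+: s.toList := by
        intro hc; exact h ((PySem.Str.isIn_iff_infix e s).mpr hc)
      have hf : PySem.Str.find s e = -1 := (PySem.Str.find_eq_neg_one_iff s e).mpr this
      rw [if_neg (by rw [hf]; omega), hb]; simp

-- helper facts about count.go needed for count_pos (the prelude has no positivity lemma for count)
theorem brGo_ge (sub : List Char) (fuel : Nat) (l : List Char) (acc : Nat) :
    acc ≤ PySem.Chars.count.go sub fuel l acc := by
  induction fuel generalizing l acc with
  | zero => unfold PySem.Chars.count.go; cases l <;> simp
  | succ n ih =>
    unfold PySem.Chars.count.go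
    cases l with
    | nil => simp
    | cons h t =>
      simp only
      split
      · exact le_trans (Nat.le_succ acc) (ih _ _)
      · exact ih _ _

theorem brGo_pos (c : Char) (fuel : Nat) (l : List Char) (acc : Nat)
    (hm : c ∈ l) (hf : l.length ≤ fuel) :
    acc + 1 ≤ PySem.Chars.count.go [c] fuel l acc := by
  induction fuel generalizing l acc with
  | zero => simp at hf; subst hf; simp at hm
  | succ n ih =>
    unfold PySem.Chars.count.go
    cases l with
    | nil => simp at hm
    | cons h t =>
      simp only
      split
      · exact brGo_ge _ _ _ _
      · rename_i hpre
        have hne : h ≠ c := by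
          intro he; subst he
          simp [List.isPrefixOf] at hpre
        have hmt : c ∈ t := by
          rcases List.mem_cons.mp hm with h1 | h1
          · exact absurd h1.symm hne
          · exact h1
        exact ih _ _ hmt (by simpa using Nat.le_of_succ_le_succ (by simpa using hf))

-- a single character occurring in s has s.count(c) ≥ 1
theorem brCount_pos (cs : List Char) (c : Char) (h : c ∈ cs) : 1 ≤ PySem.Chars.count cs [c] := by
  have := brGo_pos c cs.length cs 0 h le_rfl
  simpa [PySem.Chars.count] using this

-- XNOR-reduce facts
theorem brReduce_append (x : Bool) (l1 l2 : List Bool) :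
    brReduce x (l1 ++ l2) = brReduce (brReduce x l1) l2 := by
  induction l1 generalizing x with
  | nil => rfl
  | cons y rest ih => simp [brReduce, ih]

theorem brReduce_true (x : Bool) (n : Nat) : brReduce x (List.replicate n true) = x := by
  induction n generalizing x with
  | zero => rfl
  | succ m ih => simp [List.replicate_succ, brReduce, ih, Bool.xor_true]

theorem brReduce_false (x : Bool) (n : Nat) :
    brReduce x (List.replicate n false) = if n % 2 = 0 then x else !x := by
  induction n generalizing x with
  | zero => rfl
  | succ m ih =>
    simp only [List.replicate_succ, brReduce, Bool.xor_false]
    rw [ih]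
    rcases Nat.even_or_odd m with h | h
    · have h0 : m % 2 = 0 := Nat.even_iff.mp h
      have h1 : (m + 1) % 2 = 1 := by omega
      simp [h0, h1]
    · have h0 : m % 2 = 1 := Nat.odd_iff.mp h
      have h1 : (m + 1) % 2 = 0 := by omega
      simp [h0, h1]

-- the whole reduce over T trues followed by F falses, nonempty, is 'F is even'
theorem brReduce_tf (T F : Nat) (h : 0 < T + F) :
    (match List.replicate T true ++ List.replicate F false with
      | [] => (0 : Int)
      | x :: rest => if brReduce x rest then 2 else 3) = if F % 2 = 0 then 2 else 3 := by
  cases T with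
  | succ m =>
    simp only [List.replicate_succ, List.cons_append]
    rw [brReduce_append, brReduce_true, brReduce_false]
    rcases Nat.even_or_odd F with h | h
    · have h0 : F % 2 = 0 := Nat.even_iff.mp h; simp [h0]
    · have h0 : F % 2 = 1 := Nat.odd_iff.mp h; simp [h0]
  | zero =>
    cases F with
    | zero => omega
    | succ k =>
      simp only [List.replicate, List.nil_append]
      rw [brReduce_false]
      rcases Nat.even_or_odd k with h | h
      · have h0 : k % 2 = 0 := Nat.even_iff.mp h
        have h1 : (k + 1) % 2 = 1 := by omega
        simp [h0, h1]
      · have h0 : k % 2 = 1 := Nat.odd_iff.mp h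
        have h1 : (k + 1) % 2 = 0 := by omega
        simp [h0, h1]

-- under the guards (sen1 nonempty, sen2 empty) some yes/no element is a character of s, so T + F > 0
theorem brTF_ne_nil (s : String) (yes no others : List String)
    (h1 : PySem.Set.diff (PySem.Set.ofList (s.toList.map (fun c => String.mk [c]))) others ≠ [])
    (h2 : PySem.Set.diff (PySem.Set.diff (PySem.Set.diff (PySem.Set.ofList (s.toList.map (fun c => String.mk [c]))) others) yes) no = []) :
    0 < (yes.map (fun e => PySem.Str.count s e)).sum + (no.map (fun e => PySem.Str.count s e)).sum := by
  set sen1 := PySem.Set.diff (PySem.Set.ofList (s.toList.map (fun c => String.mk [c]))) others with hs1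
  obtain ⟨x, hx⟩ := List.exists_mem_of_ne_nil _ h1
  have hx1 : x ∈ PySem.Set.ofList (s.toList.map (fun c => String.mk [c])) ∧ x ∉ others :=
    (PySem.Set.mem_diff _ _ _).mp hx
  have hxc : x ∈ s.toList.map (fun c => String.mk [c]) := (PySem.Set.mem_ofList _ _).mp hx1.1
  obtain ⟨c, hcs, hceq⟩ := List.mem_map.mp hxc
  have hxn : x ∉ PySem.Set.diff (PySem.Set.diff sen1 yes) no := by
    rw [h2]; exact List.not_mem_nil
  have hyn : x ∈ yes ∨ x ∈ no := by
    by_contra hcon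
    push_neg at hcon
    exact hxn ((PySem.Set.mem_diff _ _ _).mpr ⟨(PySem.Set.mem_diff _ _ _).mpr ⟨hx, hcon.1⟩, hcon.2⟩)
  have hcount : 1 ≤ PySem.Str.count s x := by
    rw [PySem.Str.count_eq, ← hceq]
    have : (String.mk [c]).toList = [c] := Eq.symm (String.ofList_eq.mp rfl)
    rw [this]
    exact brCount_pos s.toList c hcs
  rcases hyn with hmem | hmem
  · have : PySem.Str.count s x ≤ (yes.map (fun e => PySem.Str.count s e)).sum :=
      List.single_le_sum (fun _ _ => Nat.zero_le _) _ (List.mem_map.mpr ⟨x, hmem, rfl⟩)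
    omega
  · have : PySem.Str.count s x ≤ (no.map (fun e => PySem.Str.count s e)).sum :=
      List.single_le_sum (fun _ _ => Nat.zero_le _) _ (List.mem_map.mpr ⟨x, hmem, rfl⟩)
    omega

-- the Int fold of counts is the cast of the Nat sum
theorem brFold_eq (s : String) (l : List String) :
    l.foldl (fun acc e => acc + (PySem.Str.count s e : Int)) 0
      = ((l.map (fun e => PySem.Str.count s e)).sum : Nat) := by
  rw [PySem.List.foldl_add]
  push_cast
  simp [List.map_map, Function.comp_def]

theorem brSum_cast (s : String) (l : List String) :
    (l.map (fun e => (PySem.Str.count s e : Int))).sum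
      = ((l.map (fun e => PySem.Str.count s e)).sum : Nat) := by
  push_cast
  simp [List.map_map, Function.comp_def]

-- ===== VERDICT (by name: the statement is the Claim_ definition above) =====
theorem boolean_replace_spec : Claim_equal_boolean_replace := by
  intro s yes no others filtered _
  unfold Spec_boolean_replace
  simp only [boolean_replace, boolean_replace_alt]
  rw [brFilt_eq_any]
  by_cases hf : filtered.any (fun e => PySem.Str.isIn e s) = true
  · rw [if_pos hf, if_pos hf]
  · rw [if_neg hf, if_neg hf]
    by_cases h1 : PySem.Set.diff (PySem.Set.ofList (s.toList.map (fun c => String.mk [c]))) others = []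
    · rw [if_pos h1, if_pos h1]
    · rw [if_neg h1, if_neg h1]
      by_cases h2 : PySem.Set.diff (PySem.Set.diff (PySem.Set.diff (PySem.Set.ofList (s.toList.map (fun c => String.mk [c]))) others) yes) no ≠ []
      · rw [if_pos h2, if_pos h2]
      · rw [if_neg h2, if_neg h2]
        push_neg at h2
        rw [brFold_eq, brFold_eq, brSum_cast]
        set T := (yes.map (fun e => PySem.Str.count s e)).sum with hT
        set F := (no.map (fun e => PySem.Str.count s e)).sum with hF
        have hpos : 0 < T + F := brTF_ne_nil s yes no others h1 h2
        rw [Int.toNat_natCast, Int.toNat_natCast]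
        rw [brReduce_tf T F hpos]
        have hm : PySem.Int.mod ((F : Nat) : Int) 2 = ((F : Nat) : Int) % 2 :=
          PySem.Int.mod_eq_emod_of_pos (by omega)
        rcases Nat.even_or_odd F with h | h
        · have h0 : F % 2 = 0 := Nat.even_iff.mp h
          rw [if_pos h0, if_pos (by rw [hm]; omega)]
        · have h0 : F % 2 = 1 := Nat.odd_iff.mp h
          rw [if_neg (by omega), if_neg (by rw [hm]; omega)]
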